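-- pv_equiv track=rewrite | github.com/GeneralZh/Twitter-Sentiment-Analysis | Tweet.py | micro
-- ===== SOURCE A (Python) =====
-- def micro(tweet_tag):
--     cue = [',', '.', '!', ':', ';','?', 'and', 'because', 'bc', 'coz', 'cuz', 'however', 'but', '...']
--     micro_phrase = []
--
--     temp = []
--     for word in tweet_tag:
--         if word[0] not in cue:
--             temp += [word]
--         else:
--             temp += [word]
--             micro_phrase += [temp]
--             temp = []
--     if temp != []:
--         micro_phrase += [temp]
--
--     return micro_phrase
-- ===== SOURCE B (Python) =====
-- def micro(tweet_tag):
--     cue = [',', '.', '!', ':', ';', '?', 'and', 'because', 'bc', 'coz', 'cuz', 'however', 'but', '...']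
--     # phase 1: boundary indices where the token is a cue word
--     bounds = [i for i, word in enumerate(tweet_tag) if word[0] in cue]
--     # phase 2: cut the list at those boundaries
--     phrases = []
--     prev = 0
--     for b in bounds:
--         phrases.append(tweet_tag[prev:b + 1])
--         prev = b + 1
--     if prev < len(tweet_tag):
--         phrases.append(tweet_tag[prev:])
--     return phrases
-- ===== Notes on version B (the rewrite author's own statement) =====
-- stated objective: alternative
-- what changed: Replaces A's single accumulator loop (growing temp, flushing on cue) by a two-phase plan: first collect boundary indices of cue words, then cut phrases out as slices tweet_tag[prev:b+1] plus a non-empty trailing slice.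
import Mathlib
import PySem

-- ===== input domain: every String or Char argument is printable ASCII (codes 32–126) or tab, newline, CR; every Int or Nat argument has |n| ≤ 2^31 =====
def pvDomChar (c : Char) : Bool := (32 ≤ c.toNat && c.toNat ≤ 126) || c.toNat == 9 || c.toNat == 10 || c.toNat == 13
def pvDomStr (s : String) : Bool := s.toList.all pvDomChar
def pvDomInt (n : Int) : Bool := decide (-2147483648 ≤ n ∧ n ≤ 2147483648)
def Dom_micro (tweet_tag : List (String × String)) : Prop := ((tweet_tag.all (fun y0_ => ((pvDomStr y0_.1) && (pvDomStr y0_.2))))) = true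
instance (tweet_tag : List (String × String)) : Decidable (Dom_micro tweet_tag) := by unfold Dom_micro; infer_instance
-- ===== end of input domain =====

-- B replaces A's accumulator loop by a two-phase plan (boundary indices, then slices); alternative decomposition, same cost.


-- the cue list, shared verbatim by both ports
def cueList : List String :=
  [",", ".", "!", ":", ";", "?", "and", "because", "bc", "coz", "cuz", "however", "but", "..."]

-- ===== PORT A =====
-- A: one pass with a growing temp, flushed into micro_phrase at each cue word
def micro (tweet_tag : List (String × String)) : List (List (String × String)) :=
  let st := tweet_tag.foldl
    (fun (st : List (List (String × String)) × List (String × String)) word =>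
      if ¬ (cueList.contains word.1) then (st.1, st.2 ++ [word])
      else (st.1 ++ [st.2 ++ [word]], []))
    ([], [])
  if st.2 ≠ [] then st.1 ++ [st.2] else st.1

-- ===== PORT B =====
-- B: phase 1 collects boundary indices, phase 2 cuts the list at them by slicing
def micro_alt (tweet_tag : List (String × String)) : List (List (String × String)) :=
  let bounds : List Int :=
    ((PySem.List.enumerate tweet_tag 0).filter (fun p => cueList.contains p.2.1)).map (·.1)
  let st := bounds.foldl
    (fun (st : List (List (String × String)) × Int) b =>
      (st.1 ++ [PySem.List.slice tweet_tag (some st.2) (some (b + 1))], b + 1))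
    ([], 0)
  if st.2 < (tweet_tag.length : Int) then st.1 ++ [PySem.List.slice tweet_tag (some st.2) none]
  else st.1

-- ===== PRECONDITION & SPEC =====
def Spec_micro (tweet_tag : List (String × String)) (out : List (List (String × String))) : Prop := out = micro_alt tweet_tag
instance (tweet_tag : List (String × String)) (out : List (List (String × String))) : Decidable (Spec_micro tweet_tag out) := by unfold Spec_micro; infer_instance

-- ===== CLAIM (what is proved, stated in full; the proofs are below) =====
def Claim_equal_micro : Prop := ∀ (tweet_tag : List (String × String)), Dom_micro tweet_tag → Spec_micro tweet_tag (micro tweet_tag)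

-- ===== LEMMAS AND PROOFS =====

-- proof-side names for A's loop body and finish step
def stepA (st : List (List (String × String)) × List (String × String)) (word : String × String) :
    List (List (String × String)) × List (String × String) :=
  if ¬ (cueList.contains word.1) then (st.1, st.2 ++ [word])
  else (st.1 ++ [st.2 ++ [word]], [])

def finA (st : List (List (String × String)) × List (String × String)) :
    List (List (String × String)) :=
  if st.2 ≠ [] then st.1 ++ [st.2] else st.1

-- proof-side names for B's loop body and finish step
def stepB (toks : List (String × String))
    (st : List (List (String × String)) × Int) (b : Int) :
    List (List (String × String)) × Int :=
  (st.1 ++ [PySem.List.slice toks (some st.2) (some (b + 1))], b + 1)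

def finB (toks : List (String × String)) (st : List (List (String × String)) × Int) :
    List (List (String × String)) :=
  if st.2 < (toks.length : Int) then st.1 ++ [PySem.List.slice toks (some st.2) none] else st.1

-- canonical splitter: gSplit temp toks = phrases of toks with pending prefix temp
def gSplit (temp : List (String × String)) : List (String × String) → List (List (String × String))
  | [] => if temp = [] then [] else [temp]
  | w :: ws => if cueList.contains w.1 then (temp ++ [w]) :: gSplit [] ws else gSplit (temp ++ [w]) ws

-- Nat-level boundary indices
def boundsR : List (String × String) → List Nat
  | [] => []
  | w :: ws => if cueList.contains w.1 then 0 :: (boundsR ws).map (· + 1) else (boundsR ws).map (· + 1)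

-- Nat-level phase 2
def goR : List Nat → Nat → List (String × String) → List (List (String × String))
  | [], prev, toks => if prev < toks.length then [toks.drop prev] else []
  | b :: bs, prev, toks => ((toks.drop prev).take (b + 1 - prev)) :: goR bs (b + 1) toks

def consFirst (temp : List (String × String)) : List (List (String × String)) → List (List (String × String))
  | [] => if temp = [] then [] else [temp]
  | p :: ps => (temp ++ p) :: ps

theorem consFirst_nil (out : List (List (String × String))) : consFirst [] out = out := by
  cases out <;> simp [consFirst]

theorem consFirst_comp (temp w : List (String × String)) (hw : w ≠ [])
    (out : List (List (String × String))) :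
    consFirst temp (consFirst w out) = consFirst (temp ++ w) out := by
  cases out with
  | nil => simp [consFirst, hw]
  | cons p ps => cases w with
    | nil => exact absurd rfl hw
    | cons a as => simp [consFirst]

theorem foldA_eq (toks : List (String × String)) :
    ∀ (acc : List (List (String × String))) (temp : List (String × String)),
    finA (toks.foldl stepA (acc, temp)) = acc ++ gSplit temp toks := by
  induction toks with
  | nil =>
    intro acc temp
    by_cases h : temp = [] <;> simp [finA, gSplit, h]
  | cons w ws ih =>
    intro acc temp
    by_cases h : w.1 ∈ cueList
    · rw [List.foldl_cons, show stepA (acc, temp) w = (acc ++ [temp ++ [w]], []) by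
        simp [stepA, h]]
      rw [ih (acc ++ [temp ++ [w]]) []]
      simp [gSplit, h]
    · rw [List.foldl_cons, show stepA (acc, temp) w = (acc, temp ++ [w]) by
        simp [stepA, h]]
      rw [ih acc (temp ++ [w])]
      simp [gSplit, h]

theorem micro_eq_gSplit (toks : List (String × String)) : micro toks = gSplit [] toks := by
  have : micro toks = finA (toks.foldl stepA ([], [])) := rfl
  rw [this, foldA_eq toks [] []]
  rfl

theorem bounds_eq (toks : List (String × String)) :
    ∀ (s : Int),
    ((PySem.List.enumerate toks s).filter (fun p => cueList.contains p.2.1)).map (·.1)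
      = (boundsR toks).map (fun n : Nat => s + n) := by
  induction toks with
  | nil => intro s; simp [PySem.List.enumerate_nil, boundsR]
  | cons w ws ih =>
    intro s
    have ih' := ih (s + 1)
    simp at ih'
    by_cases h : w.1 ∈ cueList
    · simp [PySem.List.enumerate_cons, h, boundsR, List.map_map, Function.comp_def]
      rw [ih']
      exact List.map_congr_left (fun n _ => by omega)
    · simp [PySem.List.enumerate_cons, h, boundsR, List.map_map, Function.comp_def]
      rw [ih']
      exact List.map_congr_left (fun n _ => by omega)

theorem goR_shift (bs : List Nat) :
    ∀ (prev : Nat) (w : String × String) (toks : List (String × String)),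
    goR (bs.map (· + 1)) (prev + 1) (w :: toks) = goR bs prev toks := by
  induction bs with
  | nil => intro prev w toks; simp [goR]
  | cons b bs ih =>
    intro prev w toks
    simp only [List.map_cons, goR, List.drop_succ_cons]
    rw [show b + 1 + 1 - (prev + 1) = b + 1 - prev by omega, ih (b + 1) w toks]

theorem goR_step (bs : List Nat) (w : String × String) (ws : List (String × String)) :
    goR (bs.map (· + 1)) 0 (w :: ws) = consFirst [w] (goR bs 0 ws) := by
  cases bs with
  | nil =>
    by_cases h : 0 < ws.length
    · simp [goR, consFirst, h]
    · have hws : ws = [] := by cases ws <;> simp_all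
      simp [hws, goR, consFirst]
  | cons b bs =>
    simp only [List.map_cons, goR, List.drop_zero, Nat.sub_zero, List.take_succ_cons,
      consFirst, List.singleton_append]
    rw [goR_shift]

theorem goR_bounds (ws : List (String × String)) :
    ∀ (temp : List (String × String)),
    consFirst temp (goR (boundsR ws) 0 ws) = gSplit temp ws := by
  induction ws with
  | nil => intro temp; simp [boundsR, goR, gSplit, consFirst]
  | cons w ws ih =>
    intro temp
    by_cases h : w.1 ∈ cueList
    · have h0 : goR (boundsR ws) 0 ws = gSplit [] ws := by
        rw [← consFirst_nil (goR (boundsR ws) 0 ws)]; exact ih []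
      rw [show boundsR (w :: ws) = 0 :: (boundsR ws).map (· + 1) by simp [boundsR, h]]
      rw [show gSplit temp (w :: ws) = (temp ++ [w]) :: gSplit [] ws by simp [gSplit, h]]
      simp only [goR, List.drop_zero, Nat.sub_zero, List.take_succ_cons, List.take_zero]
      rw [goR_shift, h0]
      rfl
    · calc consFirst temp (goR (boundsR (w :: ws)) 0 (w :: ws))
          = consFirst temp (consFirst [w] (goR (boundsR ws) 0 ws)) := by
            rw [show boundsR (w :: ws) = (boundsR ws).map (· + 1) by simp [boundsR, h],
              goR_step]
        _ = consFirst (temp ++ [w]) (goR (boundsR ws) 0 ws) :=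
            consFirst_comp temp [w] (by simp) _
        _ = gSplit (temp ++ [w]) ws := ih (temp ++ [w])
        _ = gSplit temp (w :: ws) := by simp [gSplit, h]

theorem foldB_eq (toks : List (String × String)) (bsN : List Nat) :
    ∀ (acc : List (List (String × String))) (prevN : Nat),
    finB toks ((bsN.map (fun n : Nat => (n : Int))).foldl (stepB toks) (acc, (prevN : Int)))
      = acc ++ goR bsN prevN toks := by
  induction bsN with
  | nil =>
    intro acc prevN
    by_cases h : prevN < toks.length
    · simp [finB, goR, h, PySem.List.slice_from_natCast, Int.ofNat_lt.mpr h]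
    · have h' : ¬ ((prevN : Int) < (toks.length : Int)) := by exact_mod_cast h
      simp [finB, goR, h, h']
  | cons b bs ih =>
    intro acc prevN
    have hb : ((b : Int) + 1) = ((b + 1 : Nat) : Int) := by push_cast; ring
    have hsl : PySem.List.slice toks (some (prevN : Int)) (some ((b : Int) + 1))
        = (toks.drop prevN).take (b + 1 - prevN) := by
      rw [hb, PySem.List.slice_natCast]
    rw [List.map_cons, List.foldl_cons,
      show stepB toks (acc, (prevN : Int)) (b : Int)
        = (acc ++ [(toks.drop prevN).take (b + 1 - prevN)], ((b + 1 : Nat) : Int)) by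
          simp only [stepB]; rw [hsl, hb]]
    rw [ih (acc ++ [(toks.drop prevN).take (b + 1 - prevN)]) (b + 1)]
    simp [goR]

theorem micro_alt_eq_goR (toks : List (String × String)) :
    micro_alt toks = goR (boundsR toks) 0 toks := by
  have h0 : micro_alt toks
      = finB toks ((((PySem.List.enumerate toks 0).filter
          (fun p => cueList.contains p.2.1)).map (·.1)).foldl (stepB toks) ([], 0)) := rfl
  have hb : ((PySem.List.enumerate toks 0).filter (fun p => cueList.contains p.2.1)).map (·.1)
      = (boundsR toks).map (fun n : Nat => (n : Int)) := by
    rw [bounds_eq toks 0]; exact List.map_congr_left (fun n _ => by ring)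
  rw [h0, hb, show (0 : Int) = ((0 : Nat) : Int) by norm_num, foldB_eq toks (boundsR toks) [] 0]
  rfl

-- ===== VERDICT (by name: the statement is the Claim_ definition above) =====
theorem micro_spec : Claim_equal_micro := by
  intro tweet_tag _
  show micro tweet_tag = micro_alt tweet_tag
  rw [micro_eq_gSplit, micro_alt_eq_goR, ← goR_bounds tweet_tag [], consFirst_nil]
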